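-- pv_equiv track=rewrite | github.com/lequangson01/battleship | battleship.py | create_boat
-- ===== SOURCE A (Python) =====
-- def check_ok(boat, taken_positions):
-- # input: boat, taken_positions
-- # this func checks if the boat outside the playground or the position of the boat is already in taken_position
-- # return: boat. boat will returned as [-1] or its specific position
--     for i in range(len(boat)):
--         if boat[i] in taken_positions:
--         #this condition checks if the block boat[i] is already in the list taken_positions
--             boat = [-1]
--             break
--         elif boat[i] > 99 or boat[i] < 0:
--         #this condition checks border 1 and 3
--             boat = [-1]
--             break
--         elif boat[i] % 10 == 9 and i < len(boat)-1:
--         #this condition checks border 2 and 4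
--             if boat[i+1] % 10 == 0:
--                 boat = [-1]
--                 break
--     return boat
--
-- def create_boat(len_of_boat, boat_start, boat_direction, taken_positions):
-- # input: len_of_boat, boat_start, boat_direction, taken_positions
-- # this func initializes boat = []
-- # with len_of_boat, boat_start, boat_direction, this func create the position of the boat
-- # calls check_ok(boat, taken_positions) to see if the boat outside playground or the position of the boat is already in taken_position
-- # return: boat. boat will returned as [-1] or its specific position
--     boat = []
--     if boat_direction == 1:
--         for i in range(len_of_boat):
--             boat.append(boat_start - i * 10) # already have the position of boat after this line
--             boat = check_ok(boat, taken_positions)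
--     elif boat_direction == 2:
--         for i in range(len_of_boat):
--             boat.append(boat_start + i)
--             boat = check_ok(boat, taken_positions)
--     elif boat_direction == 3:
--         for i in range(len_of_boat):
--             boat.append(boat_start + i * 10)
--             boat = check_ok(boat, taken_positions)
--     elif boat_direction == 4:
--         for i in range(len_of_boat):
--             boat.append(boat_start - i)
--             boat = check_ok(boat, taken_positions)
--     return boat
-- ===== SOURCE B (Python) =====
-- def create_boat(len_of_boat, boat_start, boat_direction, taken_positions):
--     delta = {1: -10, 2: 1, 3: 10, 4: -1}.get(boat_direction)
--     if delta is None: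
--         return []
--     positions = [boat_start + i * delta for i in range(len_of_boat)]
--     taken = set(taken_positions)
--
--     def ok(cells):
--         if not cells:
--             return True
--         p, rest = cells[0], cells[1:]
--         if p in taken or not 0 <= p <= 99:
--             return False
--         if rest and p % 10 == 9 and rest[0] % 10 == 0:
--             return False
--         return ok(rest)
--
--     return positions if ok(positions) else [-1]
-- ===== Notes on version B (the rewrite author's own statement) =====
-- stated objective: simpler
-- what changed: B builds the full cell list at once from a direction-to-delta dict and validates the final list in a single structural head/tail pass, instead of A's loop that appends one cell and then rescans the whole prefix with check_ok after every append.
import Mathlib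
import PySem

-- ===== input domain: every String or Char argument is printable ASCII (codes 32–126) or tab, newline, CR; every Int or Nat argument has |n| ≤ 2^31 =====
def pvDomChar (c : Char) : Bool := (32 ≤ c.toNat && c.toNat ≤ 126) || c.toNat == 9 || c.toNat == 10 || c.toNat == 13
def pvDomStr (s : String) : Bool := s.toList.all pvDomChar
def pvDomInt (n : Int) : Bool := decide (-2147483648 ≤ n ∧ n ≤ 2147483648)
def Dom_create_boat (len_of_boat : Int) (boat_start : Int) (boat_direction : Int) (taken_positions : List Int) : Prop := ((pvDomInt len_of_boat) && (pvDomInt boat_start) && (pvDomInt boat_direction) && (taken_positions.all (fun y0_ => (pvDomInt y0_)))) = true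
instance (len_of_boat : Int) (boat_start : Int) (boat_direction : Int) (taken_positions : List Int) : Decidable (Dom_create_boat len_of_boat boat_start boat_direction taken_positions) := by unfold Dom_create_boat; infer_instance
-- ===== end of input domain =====

-- B builds all cells from a direction→delta map and validates the final list in one pass,
-- replacing A's append-then-rescan-the-whole-prefix loop (objective: simpler).

-- ===== PORT A =====
-- check_ok's for-loop with break, index i over range(len(boat))
def check_ok_loop (boat : List Int) (taken_positions : List Int) (i : Nat) : List Int :=
  if h : i < boat.length then
    if taken_positions.contains boat[i] then [-1]
    else if boat[i] > 99 ∨ boat[i] < 0 then [-1]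
    else if PySem.Int.mod boat[i] 10 = 9 ∧ i + 1 < boat.length then
      -- i + 1 < boat.length is Python's 'i < len(boat)-1'; boat[i+1] is then in range
      if PySem.Int.mod (boat.getD (i + 1) 0) 10 = 0 then [-1]
      else check_ok_loop boat taken_positions (i + 1)
    else check_ok_loop boat taken_positions (i + 1)
  else boat
termination_by boat.length - i

def check_ok (boat : List Int) (taken_positions : List Int) : List Int :=
  check_ok_loop boat taken_positions 0

def create_boat (len_of_boat : Int) (boat_start : Int) (boat_direction : Int) (taken_positions : List Int) : List Int :=
  let boat : List Int := []
  if boat_direction = 1 then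
    (List.range len_of_boat.toNat).foldl
      (fun b (i : Nat) => check_ok (b ++ [boat_start - (i : Int) * 10]) taken_positions) boat
  else if boat_direction = 2 then
    (List.range len_of_boat.toNat).foldl
      (fun b (i : Nat) => check_ok (b ++ [boat_start + (i : Int)]) taken_positions) boat
  else if boat_direction = 3 then
    (List.range len_of_boat.toNat).foldl
      (fun b (i : Nat) => check_ok (b ++ [boat_start + (i : Int) * 10]) taken_positions) boat
  else if boat_direction = 4 then
    (List.range len_of_boat.toNat).foldl
      (fun b (i : Nat) => check_ok (b ++ [boat_start - (i : Int)]) taken_positions) boat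
  else boat

-- ===== PORT B =====
-- B's helper ok(cells): recursive head/tail validation of the final cell list
def cb_ok (taken : PySem.Set Int) : List Int → Bool
  | [] => true
  | p :: rest =>
    if PySem.Set.contains taken p then false
    else if ¬ (0 ≤ p ∧ p ≤ 99) then false
    else if (match rest with
             | q :: _ => PySem.Int.mod p 10 == 9 && PySem.Int.mod q 10 == 0
             | [] => false) then false
    else cb_ok taken rest

def create_boat_alt (len_of_boat : Int) (boat_start : Int) (boat_direction : Int) (taken_positions : List Int) : List Int :=
  match (PySem.Dict.ofList [((1 : Int), (-10 : Int)), (2, 1), (3, 10), (4, -1)]).get? boat_direction with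
  | none => []
  | some delta =>
    let positions := (List.range len_of_boat.toNat).map (fun (i : Nat) => boat_start + (i : Int) * delta)
    let taken := PySem.Set.ofList taken_positions
    if cb_ok taken positions then positions else [-1]

-- ===== PRECONDITION & SPEC =====
def Spec_create_boat (len_of_boat : Int) (boat_start : Int) (boat_direction : Int) (taken_positions : List Int) (out : List Int) : Prop := out = create_boat_alt len_of_boat boat_start boat_direction taken_positions
instance (len_of_boat : Int) (boat_start : Int) (boat_direction : Int) (taken_positions : List Int) (out : List Int) : Decidable (Spec_create_boat len_of_boat boat_start boat_direction taken_positions out) := by unfold Spec_create_boat; infer_instance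

-- ===== CLAIM (what is proved, stated in full; the proofs are below) =====
def Claim_equal_create_boat : Prop := ∀ (len_of_boat : Int) (boat_start : Int) (boat_direction : Int) (taken_positions : List Int), Dom_create_boat len_of_boat boat_start boat_direction taken_positions → Spec_create_boat len_of_boat boat_start boat_direction taken_positions (create_boat len_of_boat boat_start boat_direction taken_positions)

-- ===== LEMMAS AND PROOFS =====

-- check_ok's index loop from i computes B's structural validation of boat.drop i
theorem check_ok_loop_eq (boat taken : List Int) (i : Nat) :
    check_ok_loop boat taken i =
      if cb_ok (PySem.Set.ofList taken) (boat.drop i) then boat else [-1] := by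
  rw [check_ok_loop]
  by_cases h : i < boat.length
  · have ih := check_ok_loop_eq boat taken (i + 1)
    rw [dif_pos h, List.drop_eq_getElem_cons h]
    by_cases h1 : boat[i] ∈ taken
    · simp [cb_ok, PySem.Set.contains_eq_listContains, h1]
    · by_cases h2 : boat[i] > 99 ∨ boat[i] < 0
      · simp [cb_ok, PySem.Set.contains_eq_listContains, h1, h2,
              show ¬ (0 ≤ boat[i] ∧ boat[i] ≤ 99) by omega]
      · have hr : 0 ≤ boat[i] ∧ boat[i] ≤ 99 := by omega
        by_cases h4 : i + 1 < boat.length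
        · have hd2 : boat.drop (i + 1) = boat[i + 1] :: boat.drop (i + 2) :=
            List.drop_eq_getElem_cons h4
          simp only [hd2] at ih ⊢
          by_cases h5 : boat[i] % 10 = 9
          · by_cases h6 : (10 : Int) ∣ boat[i + 1]
            · have h6m : boat[i + 1] % 10 = 0 := Int.emod_eq_zero_of_dvd h6
              simp [cb_ok, PySem.Set.contains_eq_listContains, h1, h4, h5, h6m, hr]
            · have h6m : ¬ boat[i + 1] % 10 = 0 := fun hz => h6 (Int.dvd_of_emod_eq_zero hz)
              simp [cb_ok, PySem.Set.contains_eq_listContains, h1, h4, h5, h6m, hr, ih]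
          · simp [cb_ok, PySem.Set.contains_eq_listContains, h1, h4, h5, hr, ih]
        · have hd2 : boat.drop (i + 1) = [] := List.drop_eq_nil_of_le (by omega)
          simp only [hd2] at ih ⊢
          simp [cb_ok, PySem.Set.contains_eq_listContains, h1, h4, hr, ih]
  · rw [dif_neg h, List.drop_eq_nil_of_le (by omega : boat.length ≤ i)]
    simp [cb_ok]
termination_by boat.length - i

theorem check_ok_eq (boat taken : List Int) :
    check_ok boat taken = if cb_ok (PySem.Set.ofList taken) boat then boat else [-1] := by
  simpa using check_ok_loop_eq boat taken 0

-- validity of a list forces validity of each of its prefixes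
theorem cb_ok_append_false (taken : PySem.Set Int) (xs ys : List Int)
    (h : cb_ok taken xs = false) : cb_ok taken (xs ++ ys) = false := by
  induction xs with
  | nil => simp [cb_ok] at h
  | cons p rest ih =>
    simp only [cb_ok] at h
    simp only [List.cons_append, cb_ok]
    split_ifs at h ⊢ <;>
      first
        | rfl
        | exact ih h
        | (cases rest <;> simp_all)

-- A's append-then-recheck fold over range n equals B's one-shot validation of the full list
theorem fold_eq (taken : List Int) (cell : Nat → Int) (n : Nat) :
    (List.range n).foldl (fun b (i : Nat) => check_ok (b ++ [cell i]) taken) [] =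
      (if cb_ok (PySem.Set.ofList taken) ((List.range n).map cell)
       then (List.range n).map cell else [-1]) := by
  induction n with
  | zero => simp [cb_ok]
  | succ n ih =>
    rw [List.range_succ, List.foldl_append, List.foldl_cons, List.foldl_nil, ih,
        List.map_append, List.map_cons, List.map_nil]
    by_cases hp : cb_ok (PySem.Set.ofList taken) ((List.range n).map cell) = true
    · rw [if_pos hp, check_ok_eq]
    · rw [if_neg hp, check_ok_eq,
          if_neg (show ¬ cb_ok (PySem.Set.ofList taken) ([-1] ++ [cell n]) = true by
            simp [cb_ok]),
          if_neg (show ¬ cb_ok (PySem.Set.ofList taken) ((List.range n).map cell ++ [cell n]) = true by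
            intro hh
            exact absurd (cb_ok_append_false _ _ [cell n] (Bool.eq_false_iff.mpr hp)) (by simp [hh]))]

-- ===== VERDICT (by name: the statement is the Claim_ definition above) =====
theorem create_boat_spec : Claim_equal_create_boat := by
  intro len_of_boat boat_start boat_direction taken_positions _
  unfold Spec_create_boat create_boat create_boat_alt
  by_cases h1 : boat_direction = 1
  · rw [if_pos h1, h1]
    have hget : (PySem.Dict.ofList [((1 : Int), (-10 : Int)), (2, 1), (3, 10), (4, -1)]).get? (1 : Int) = some (-10) := rfl
    simp only [hget]
    rw [show (fun i : Nat => boat_start + (i : Int) * (-10)) = (fun i : Nat => boat_start - (i : Int) * 10) from funext fun i => by ring]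
    exact fold_eq taken_positions (fun i => boat_start - (i : Int) * 10) len_of_boat.toNat
  · rw [if_neg h1]
    by_cases h2 : boat_direction = 2
    · rw [if_pos h2, h2]
      have hget : (PySem.Dict.ofList [((1 : Int), (-10 : Int)), (2, 1), (3, 10), (4, -1)]).get? (2 : Int) = some 1 := rfl
      simp only [hget]
      rw [show (fun i : Nat => boat_start + (i : Int) * 1) = (fun i : Nat => boat_start + (i : Int)) from funext fun i => by ring]
      exact fold_eq taken_positions (fun i => boat_start + (i : Int)) len_of_boat.toNat
    · rw [if_neg h2]
      by_cases h3 : boat_direction = 3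
      · rw [if_pos h3, h3]
        have hget : (PySem.Dict.ofList [((1 : Int), (-10 : Int)), (2, 1), (3, 10), (4, -1)]).get? (3 : Int) = some 10 := rfl
        simp only [hget]
        exact fold_eq taken_positions (fun i => boat_start + (i : Int) * 10) len_of_boat.toNat
      · rw [if_neg h3]
        by_cases h4 : boat_direction = 4
        · rw [if_pos h4, h4]
          have hget : (PySem.Dict.ofList [((1 : Int), (-10 : Int)), (2, 1), (3, 10), (4, -1)]).get? (4 : Int) = some (-1) := rfl
          simp only [hget]
          rw [show (fun i : Nat => boat_start + (i : Int) * (-1)) = (fun i : Nat => boat_start - (i : Int)) from funext fun i => by ring]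
          exact fold_eq taken_positions (fun i => boat_start - (i : Int)) len_of_boat.toNat
        · rw [if_neg h4]
          have hget : (PySem.Dict.ofList [((1 : Int), (-10 : Int)), (2, 1), (3, 10), (4, -1)]).get? boat_direction = none := by
            have hm : PySem.Dict.ofList [((1 : Int), (-10 : Int)), (2, 1), (3, 10), (4, -1)] =
                PySem.Dict.mk [((1 : Int), (-10 : Int)), (2, 1), (3, 10), (4, -1)] := by decide
            rw [hm, PySem.Dict.get?_mk_cons, PySem.Dict.get?_mk_cons, PySem.Dict.get?_mk_cons,
                PySem.Dict.get?_mk_cons]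
            have hnil : ({ items := [] } : PySem.Dict Int Int).get? boat_direction = none := rfl
            rw [hnil]
            simp only [beq_iff_eq]
            rw [if_neg (fun hx => h1 hx.symm), if_neg (fun hx => h2 hx.symm),
                if_neg (fun hx => h3 hx.symm), if_neg (fun hx => h4 hx.symm)]
          simp only [hget]
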